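-- pv_equiv track=rewrite | github.com/dakshsriv/Edge_Detection | main_example.py | calc_derivatives
-- ===== SOURCE A (Python) =====
-- from pprint import pprint
--
-- def calc_derivatives(table):
--     pprint(table)
--     Deriv_N = 5*(table[0][0] + table[0][1] + table[0][2]) - 3*(table[1][0] + table[1][2] + table[2][0] + table[2][1] + table[2][2])
--     Deriv_NE = 5*(table[0][1] + table[0][2] + table[1][2]) - 3*(table[0][0] + table[1][0] + table[2][0] + table[2][1] + table[2][2])
--     Deriv_E = 5*(table[0][2] + table[1][2] + table[2][2]) - 3*(table[0][1] + table[0][0] + table[1][0] + table[2][0] + table[2][1])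
--     Deriv_SE = 5*(table[1][2] + table[2][1] + table[2][2]) - 3*(table[0][0] + table[0][1] + table[0][2] + table[1][0] + table[2][0])
--     Deriv_S = 5*(table[2][0] + table[2][1] + table[2][2]) - 3*(table[0][0] + table[0][1] + table[0][2] + table[1][0] + table[1][2])
--     Deriv_SW = 5*(table[1][0] + table[2][0] + table[2][1]) - 3*(table[0][0] + table[0][1] + table[0][2] + table[1][2] + table[2][2])
--     Deriv_W = 5*(table[0][0] + table[1][0] + table[2][0]) - 3*(table[0][1] + table[0][2] + table[1][2] + table[2][1] + table[2][2])
--     Deriv_NW = 5*(table[0][0] + table[0][1] + table[1][0]) - 3*(table[0][2] + table[1][2] + table[2][0] + table[2][1] + table[2][2])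
--     derivDict = {'W':Deriv_W, 'NW':Deriv_NW, 'N':Deriv_N, 'NE':Deriv_NE, 'E':Deriv_E, 'SE':Deriv_SE, 'S':Deriv_S, 'SW':Deriv_SW}
--     max_number = 0
--     direction = ""
--     for (k,v) in derivDict.items():
--         if v > max_number:
--             max_number = v
--             direction = k
--     if max_number <= 800:
--         direction = "no edge"
--     return derivDict, direction
-- ===== SOURCE B (Python) =====
-- # Ordered Kirsch-style kernels matching each direction's +5/-3 pattern (center 0).
-- KERNELS = [
--     ('W',  [[5, -3, -3], [5, 0, -3], [5, -3, -3]]),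
--     ('NW', [[5, 5, -3], [5, 0, -3], [-3, -3, -3]]),
--     ('N',  [[5, 5, 5], [-3, 0, -3], [-3, -3, -3]]),
--     ('NE', [[-3, 5, 5], [-3, 0, 5], [-3, -3, -3]]),
--     ('E',  [[-3, -3, 5], [-3, 0, 5], [-3, -3, 5]]),
--     ('SE', [[-3, -3, -3], [-3, 0, 5], [-3, 5, 5]]),
--     ('S',  [[-3, -3, -3], [-3, 0, -3], [5, 5, 5]]),
--     ('SW', [[-3, -3, -3], [5, 0, -3], [5, 5, -3]]),
-- ]
--
-- def calc_derivatives(table):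
--     names = [name for name, _ in KERNELS]
--     vals = [sum(k[i][j] * table[i][j] for i in range(3) for j in range(3))
--             for _, k in KERNELS]
--     m = max(vals)
--     direction = "no edge" if m <= 800 else names[vals.index(m)]
--     return dict(zip(names, vals)), direction
-- ===== Notes on version B (the rewrite author's own statement) =====
-- stated objective: alternative
-- what changed: Replaced the eight hand-written directional formulas by a data-driven table of eight 3x3 Kirsch-style kernels folded against the patch, and replaced the running-max accumulator loop by max() over the value list followed by a first-index lookup for the direction name.
import Mathlib
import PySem

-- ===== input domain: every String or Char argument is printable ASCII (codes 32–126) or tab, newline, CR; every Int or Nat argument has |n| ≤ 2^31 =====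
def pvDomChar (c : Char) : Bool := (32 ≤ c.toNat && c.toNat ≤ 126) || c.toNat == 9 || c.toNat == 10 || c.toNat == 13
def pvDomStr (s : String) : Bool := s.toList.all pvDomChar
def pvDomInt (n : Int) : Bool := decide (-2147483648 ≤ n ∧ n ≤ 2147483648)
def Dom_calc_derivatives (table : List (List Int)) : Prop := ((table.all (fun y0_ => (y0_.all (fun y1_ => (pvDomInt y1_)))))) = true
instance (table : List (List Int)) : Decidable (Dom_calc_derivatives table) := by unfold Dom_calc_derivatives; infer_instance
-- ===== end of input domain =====

-- B replaces A's eight hand-written derivative formulas by a table of eight Kirsch-style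
-- kernels folded against the patch, and A's running-max loop by max over the value list plus
-- a first-index lookup (objective: alternative). Equivalence is about the return value only:
-- Python A also pprints the table to stdout (a debug print); B omits it.

-- ===== PORT A =====
-- table[i][j]; indices 0..2 are always in range under Pre_, where getD is exact
def pvGetA (table : List (List Int)) (i j : Nat) : Int := (table.getD i []).getD j 0


def calc_derivatives (table : List (List Int)) : (List (String × Int)) × String :=
  let t := pvGetA table
  let dN  := 5*(t 0 0 + t 0 1 + t 0 2) - 3*(t 1 0 + t 1 2 + t 2 0 + t 2 1 + t 2 2)
  let dNE := 5*(t 0 1 + t 0 2 + t 1 2) - 3*(t 0 0 + t 1 0 + t 2 0 + t 2 1 + t 2 2)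
  let dE  := 5*(t 0 2 + t 1 2 + t 2 2) - 3*(t 0 1 + t 0 0 + t 1 0 + t 2 0 + t 2 1)
  let dSE := 5*(t 1 2 + t 2 1 + t 2 2) - 3*(t 0 0 + t 0 1 + t 0 2 + t 1 0 + t 2 0)
  let dS  := 5*(t 2 0 + t 2 1 + t 2 2) - 3*(t 0 0 + t 0 1 + t 0 2 + t 1 0 + t 1 2)
  let dSW := 5*(t 1 0 + t 2 0 + t 2 1) - 3*(t 0 0 + t 0 1 + t 0 2 + t 1 2 + t 2 2)
  let dW  := 5*(t 0 0 + t 1 0 + t 2 0) - 3*(t 0 1 + t 0 2 + t 1 2 + t 2 1 + t 2 2)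
  let dNW := 5*(t 0 0 + t 0 1 + t 1 0) - 3*(t 0 2 + t 1 2 + t 2 0 + t 2 1 + t 2 2)
  let derivDict : List (String × Int) :=
    [("W", dW), ("NW", dNW), ("N", dN), ("NE", dNE), ("E", dE), ("SE", dSE), ("S", dS), ("SW", dSW)]
  let st := derivDict.foldl (fun (st : Int × String) kv => if kv.2 > st.1 then (kv.2, kv.1) else st) (0, "")
  (derivDict, if st.1 ≤ 800 then "no edge" else st.2)


-- ===== PORT B =====
def pvKernels : List (String × List (List Int)) :=
  [("W",  [[5, -3, -3], [5, 0, -3], [5, -3, -3]]),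
   ("NW", [[5, 5, -3], [5, 0, -3], [-3, -3, -3]]),
   ("N",  [[5, 5, 5], [-3, 0, -3], [-3, -3, -3]]),
   ("NE", [[-3, 5, 5], [-3, 0, 5], [-3, -3, -3]]),
   ("E",  [[-3, -3, 5], [-3, 0, 5], [-3, -3, 5]]),
   ("SE", [[-3, -3, -3], [-3, 0, 5], [-3, 5, 5]]),
   ("S",  [[-3, -3, -3], [-3, 0, -3], [5, 5, 5]]),
   ("SW", [[-3, -3, -3], [5, 0, -3], [5, 5, -3]])]


-- sum(k[i][j] * table[i][j] for i in range(3) for j in range(3)); indices 0..2 are in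
-- range under Pre_, where getD is exact
def pvDot (k table : List (List Int)) : Int :=
  ((List.range 3).map (fun i =>
    ((List.range 3).map (fun j => (k.getD i []).getD j 0 * (table.getD i []).getD j 0)).sum)).sum


def calc_derivatives_alt (table : List (List Int)) : (List (String × Int)) × String :=
  let names := pvKernels.map Prod.fst
  let vals := pvKernels.map (fun p => pvDot p.2 table)
  let m := (PySem.List.max? vals (fun x => x)).getD 0
  let direction := if m ≤ 800 then "no edge" else names.getD ((PySem.List.index? vals m).getD 0) ""
  (names.zip vals, direction)



-- ===== PRECONDITION & SPEC =====
-- exactly where Python A returns: it indexes table[0..2][0..2], so it raises IndexError iff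
-- the table has fewer than 3 rows or one of the first three rows has fewer than 3 entries
def Pre_calc_derivatives (table : List (List Int)) : Prop :=
  3 ≤ table.length ∧ 3 ≤ (table.getD 0 []).length ∧ 3 ≤ (table.getD 1 []).length ∧ 3 ≤ (table.getD 2 []).length
instance (table : List (List Int)) : Decidable (Pre_calc_derivatives table) := by
  unfold Pre_calc_derivatives; infer_instance
def pvWitness_calc_derivatives : List (List Int) := [[1, 2, 3], [4, 5, 6], [7, 8, 9]]

def Spec_calc_derivatives (table : List (List Int)) (out : (List (String × Int)) × String) : Prop := out = calc_derivatives_alt table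
instance (table : List (List Int)) (out : (List (String × Int)) × String) : Decidable (Spec_calc_derivatives table out) := by unfold Spec_calc_derivatives; infer_instance

-- ===== CLAIM (what is proved, stated in full; the proofs are below) =====
def Claim_equal_calc_derivatives : Prop := ∀ (table : List (List Int)), Dom_calc_derivatives table → Pre_calc_derivatives table → Spec_calc_derivatives table (calc_derivatives table)

-- ===== LEMMAS AND PROOFS =====
theorem pvFoldlMaxMem (xs : List Int) (a : Int) : xs.foldl max a = a ∨ xs.foldl max a ∈ xs := by
  induction xs generalizing a with
  | nil => simp
  | cons x t ih =>
    rcases ih (max a x) with h | h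
    · rcases max_cases a x with ⟨he, _⟩ | ⟨he, _⟩ <;> rw [he] at h <;> simp [List.foldl, he, h]
    · simp [List.foldl, h]

theorem pvFoldlMaxComm (l : List Int) (a b : Int) : l.foldl max (max a b) = max a (l.foldl max b) := by
  induction l generalizing b with
  | nil => simp
  | cons x t ih => simp [List.foldl, max_assoc, ih]


theorem pvScanGen (l : List (String × Int)) (m0 : Int) (d0 : String) :
    l.foldl (fun (st : Int × String) kv => if kv.2 > st.1 then (kv.2, kv.1) else st) (m0, d0)
      = ((l.map Prod.snd).foldl max m0,
         if (l.map Prod.snd).foldl max m0 > m0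
         then (l.map Prod.fst).getD ((PySem.List.index? (l.map Prod.snd) ((l.map Prod.snd).foldl max m0)).getD 0) ""
         else d0) := by
  induction l generalizing m0 d0 with
  | nil => simp
  | cons p t ih =>
    obtain ⟨k, v⟩ := p
    simp only [List.foldl_cons, List.map_cons]
    by_cases hv : v > m0
    · rw [if_pos hv, ih v k]
      have hmax : max m0 v = v := max_eq_right (le_of_lt hv)
      rw [hmax]
      set V := t.map Prod.snd with hV
      set T := V.foldl max v with hT
      have hvT : v ≤ T := (PySem.List.le_foldl_max V v).1
      have hTm0 : T > m0 := lt_of_lt_of_le hv hvT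
      rw [if_pos hTm0]
      by_cases hTv : T > v
      · rw [if_pos hTv]
        have hne : v ≠ T := ne_of_lt hTv
        have hmem : T ∈ V := by
          rcases pvFoldlMaxMem V v with h | h
          · omega
          · exact h
        obtain ⟨i, hi⟩ := (PySem.List.index?_isSome_iff V T).mpr hmem |> Option.isSome_iff_exists.mp
        rw [PySem.List.index?_cons_of_ne V hne, hi]
        simp
      · rw [if_neg hTv]
        have hTeq : T = v := le_antisymm (not_lt.mp hTv) hvT
        rw [hTeq, PySem.List.index?_cons_self]
        simp
    · rw [if_neg hv, ih m0 d0]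
      have hmax : max m0 v = m0 := max_eq_left (not_lt.mp hv)
      rw [hmax]
      set V := t.map Prod.snd with hV
      set M := V.foldl max m0 with hM
      by_cases hMm : M > m0
      · rw [if_pos hMm, if_pos hMm]
        have hne : v ≠ M := by omega
        have hmem : M ∈ V := by
          rcases pvFoldlMaxMem V m0 with h | h
          · omega
          · exact h
        obtain ⟨i, hi⟩ := (PySem.List.index?_isSome_iff V M).mpr hmem |> Option.isSome_iff_exists.mp
        rw [PySem.List.index?_cons_of_ne V hne, hi]
        simp
      · rw [if_neg hMm, if_neg hMm]

theorem pvDot_eq (k00 k01 k02 k10 k11 k12 k20 k21 k22 : Int) (t : List (List Int)) :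
    pvDot [[k00, k01, k02], [k10, k11, k12], [k20, k21, k22]] t
      = k00 * pvGetA t 0 0 + k01 * pvGetA t 0 1 + k02 * pvGetA t 0 2
      + k10 * pvGetA t 1 0 + k11 * pvGetA t 1 1 + k12 * pvGetA t 1 2
      + k20 * pvGetA t 2 0 + k21 * pvGetA t 2 1 + k22 * pvGetA t 2 2 := by
  simp [pvDot, pvGetA, List.range_succ, List.getD]
  ring

theorem pvFinal (v1 v2 v3 v4 v5 v6 v7 v8 : Int) (names : List String) :
    (if List.foldl max 0 [v1, v2, v3, v4, v5, v6, v7, v8] ≤ 800 then "no edge"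
     else if List.foldl max 0 [v1, v2, v3, v4, v5, v6, v7, v8] > 0
       then names.getD ((PySem.List.index? [v1, v2, v3, v4, v5, v6, v7, v8] (List.foldl max 0 [v1, v2, v3, v4, v5, v6, v7, v8])).getD 0) ""
       else "")
    = (if List.foldl max v1 [v2, v3, v4, v5, v6, v7, v8] ≤ 800 then "no edge"
       else names.getD ((PySem.List.index? [v1, v2, v3, v4, v5, v6, v7, v8] (List.foldl max v1 [v2, v3, v4, v5, v6, v7, v8])).getD 0) "") := by
  have hM : List.foldl max 0 [v1, v2, v3, v4, v5, v6, v7, v8]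
      = max 0 (List.foldl max v1 [v2, v3, v4, v5, v6, v7, v8]) := by
    rw [List.foldl_cons, show max 0 v1 = max 0 v1 from rfl, pvFoldlMaxComm]
  set m := List.foldl max v1 [v2, v3, v4, v5, v6, v7, v8] with hm
  rw [hM]
  by_cases h : m ≤ 800
  · rw [if_pos (by omega : max 0 m ≤ 800), if_pos h]
  · have h0 : max 0 m = m := max_eq_right (by omega)
    rw [h0, if_neg h, if_neg h, if_pos (by omega : m > 0)]


-- the two ports agree on every table (the scan lemma + the eight kernel-sum identities)
theorem pvMainEq (table : List (List Int)) : calc_derivatives table = calc_derivatives_alt table := by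
  unfold calc_derivatives calc_derivatives_alt pvKernels
  simp only [List.map_cons, List.map_nil, pvDot_eq]
  rw [pvScanGen]
  simp only [List.map_cons, List.map_nil, List.zip_cons_cons, List.zip_nil_right]
  rw [PySem.List.max?_id_cons]
  simp only [Option.getD_some]
  have hW : 5 * pvGetA table 0 0 + -3 * pvGetA table 0 1 + -3 * pvGetA table 0 2 + 5 * pvGetA table 1 0 + 0 * pvGetA table 1 1 + -3 * pvGetA table 1 2 + 5 * pvGetA table 2 0 + -3 * pvGetA table 2 1 + -3 * pvGetA table 2 2 = 5 * (pvGetA table 0 0 + pvGetA table 1 0 + pvGetA table 2 0) - 3 * (pvGetA table 0 1 + pvGetA table 0 2 + pvGetA table 1 2 + pvGetA table 2 1 + pvGetA table 2 2) := by ring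
  have hNW : 5 * pvGetA table 0 0 + 5 * pvGetA table 0 1 + -3 * pvGetA table 0 2 + 5 * pvGetA table 1 0 + 0 * pvGetA table 1 1 + -3 * pvGetA table 1 2 + -3 * pvGetA table 2 0 + -3 * pvGetA table 2 1 + -3 * pvGetA table 2 2 = 5 * (pvGetA table 0 0 + pvGetA table 0 1 + pvGetA table 1 0) - 3 * (pvGetA table 0 2 + pvGetA table 1 2 + pvGetA table 2 0 + pvGetA table 2 1 + pvGetA table 2 2) := by ring
  have hN : 5 * pvGetA table 0 0 + 5 * pvGetA table 0 1 + 5 * pvGetA table 0 2 + -3 * pvGetA table 1 0 + 0 * pvGetA table 1 1 + -3 * pvGetA table 1 2 + -3 * pvGetA table 2 0 + -3 * pvGetA table 2 1 + -3 * pvGetA table 2 2 = 5 * (pvGetA table 0 0 + pvGetA table 0 1 + pvGetA table 0 2) - 3 * (pvGetA table 1 0 + pvGetA table 1 2 + pvGetA table 2 0 + pvGetA table 2 1 + pvGetA table 2 2) := by ring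
  have hNE : -3 * pvGetA table 0 0 + 5 * pvGetA table 0 1 + 5 * pvGetA table 0 2 + -3 * pvGetA table 1 0 + 0 * pvGetA table 1 1 + 5 * pvGetA table 1 2 + -3 * pvGetA table 2 0 + -3 * pvGetA table 2 1 + -3 * pvGetA table 2 2 = 5 * (pvGetA table 0 1 + pvGetA table 0 2 + pvGetA table 1 2) - 3 * (pvGetA table 0 0 + pvGetA table 1 0 + pvGetA table 2 0 + pvGetA table 2 1 + pvGetA table 2 2) := by ring
  have hE : -3 * pvGetA table 0 0 + -3 * pvGetA table 0 1 + 5 * pvGetA table 0 2 + -3 * pvGetA table 1 0 + 0 * pvGetA table 1 1 + 5 * pvGetA table 1 2 + -3 * pvGetA table 2 0 + -3 * pvGetA table 2 1 + 5 * pvGetA table 2 2 = 5 * (pvGetA table 0 2 + pvGetA table 1 2 + pvGetA table 2 2) - 3 * (pvGetA table 0 1 + pvGetA table 0 0 + pvGetA table 1 0 + pvGetA table 2 0 + pvGetA table 2 1) := by ring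
  have hSE : -3 * pvGetA table 0 0 + -3 * pvGetA table 0 1 + -3 * pvGetA table 0 2 + -3 * pvGetA table 1 0 + 0 * pvGetA table 1 1 + 5 * pvGetA table 1 2 + -3 * pvGetA table 2 0 + 5 * pvGetA table 2 1 + 5 * pvGetA table 2 2 = 5 * (pvGetA table 1 2 + pvGetA table 2 1 + pvGetA table 2 2) - 3 * (pvGetA table 0 0 + pvGetA table 0 1 + pvGetA table 0 2 + pvGetA table 1 0 + pvGetA table 2 0) := by ring
  have hS : -3 * pvGetA table 0 0 + -3 * pvGetA table 0 1 + -3 * pvGetA table 0 2 + -3 * pvGetA table 1 0 + 0 * pvGetA table 1 1 + -3 * pvGetA table 1 2 + 5 * pvGetA table 2 0 + 5 * pvGetA table 2 1 + 5 * pvGetA table 2 2 = 5 * (pvGetA table 2 0 + pvGetA table 2 1 + pvGetA table 2 2) - 3 * (pvGetA table 0 0 + pvGetA table 0 1 + pvGetA table 0 2 + pvGetA table 1 0 + pvGetA table 1 2) := by ring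
  have hSW : -3 * pvGetA table 0 0 + -3 * pvGetA table 0 1 + -3 * pvGetA table 0 2 + 5 * pvGetA table 1 0 + 0 * pvGetA table 1 1 + -3 * pvGetA table 1 2 + 5 * pvGetA table 2 0 + 5 * pvGetA table 2 1 + -3 * pvGetA table 2 2 = 5 * (pvGetA table 1 0 + pvGetA table 2 0 + pvGetA table 2 1) - 3 * (pvGetA table 0 0 + pvGetA table 0 1 + pvGetA table 0 2 + pvGetA table 1 2 + pvGetA table 2 2) := by ring
  rw [hW, hNW, hN, hNE, hE, hSE, hS, hSW]
  exact congrArg₂ Prod.mk rfl (pvFinal _ _ _ _ _ _ _ _ _)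

-- ===== VERDICT (by name: the statement is the Claim_ definition above) =====
theorem calc_derivatives_spec : Claim_equal_calc_derivatives := by
  intro table _ _
  unfold Spec_calc_derivatives
  exact pvMainEq table
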